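-- pv_equiv track=rewrite | github.com/syntomic/summary | Languages_and_Algorithms/interview/num_list/53-get_count_of_k.py | get_num_same_as_index
-- ===== SOURCE A (Python) =====
-- def get_num_same_as_index(nums):
--     """递增数组中和下标相等的元素"""
--     if not nums:
--         return -1
--
--     left = 0
--     right = len(nums) - 1
--
--     while left <= right:
--         middle = left + ((right - left) >> 1)
--
--         if nums[middle] == middle:
--             return middle
--
--         if nums[middle] > middle:
--             right = middle - 1
--         else:
--             left = middle + 1
--
--     return -1
-- ===== SOURCE B (Python) =====
-- def get_num_same_as_index(nums):
--     """递增数组中和下标相等的元素"""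
--     diffs = [v - i for i, v in enumerate(nums)]
--
--     def search(lo, hi):
--         if lo > hi:
--             return -1
--         mid = (lo + hi) // 2
--         d = diffs[mid]
--         if d == 0:
--             return mid
--         if d > 0:
--             return search(lo, mid - 1)
--         return search(mid + 1, hi)
--
--     return search(0, len(nums) - 1)
-- ===== Notes on version B (the rewrite author's own statement) =====
-- stated objective: alternative
-- what changed: B first builds the difference array diffs[i] = nums[i] - i in one pass, then a recursive (lo, hi) divide-and-conquer searches that array for a zero (sign of diffs[mid] decides the half), instead of A's iterative while-loop comparing nums[middle] against middle in place.
import Mathlib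
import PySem

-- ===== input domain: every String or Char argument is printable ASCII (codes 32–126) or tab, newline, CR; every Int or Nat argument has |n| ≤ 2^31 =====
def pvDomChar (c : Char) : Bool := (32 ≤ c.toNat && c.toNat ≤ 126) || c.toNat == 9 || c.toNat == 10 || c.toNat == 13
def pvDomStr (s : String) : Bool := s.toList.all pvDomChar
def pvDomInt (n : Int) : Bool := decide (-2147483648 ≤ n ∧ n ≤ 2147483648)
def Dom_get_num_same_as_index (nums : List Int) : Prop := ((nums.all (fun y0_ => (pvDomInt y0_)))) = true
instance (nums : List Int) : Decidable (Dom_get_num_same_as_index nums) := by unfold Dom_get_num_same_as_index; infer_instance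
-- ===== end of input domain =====

-- B precomputes the difference array nums[i]-i and runs a recursive zero-search on it, replacing A's in-place iterative binary search (objective: alternative).

-- ===== PORT A =====
-- A's while-loop, one step per call; nums[middle] is always in range on the calls A makes (0 ≤ left ≤ middle ≤ right < len), so pyGetD's default is never read.
def pvALoop (nums : List Int) (left right : Int) : Int :=
  if left ≤ right then
    let middle := left + ((right - left) >>> (1:Nat))
    if PySem.List.pyGetD nums middle 0 = middle then middle
    else if PySem.List.pyGetD nums middle 0 > middle then pvALoop nums left (middle - 1)
    else pvALoop nums (middle + 1) right
  else -1
termination_by (right + 1 - left).toNat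
decreasing_by
  · have h : (right - left) >>> (1:Nat) = (right - left) / 2 := by simpa using Int.shiftRight_eq_div_pow (right - left) 1
    have hlo : 0 ≤ (right - left) / 2 := Int.ediv_nonneg (by omega) (by omega)
    have hhi : (right - left) / 2 ≤ right - left := by
      have := Int.ediv_le_self (right - left) (by omega); omega
    omega
  · have h : (right - left) >>> (1:Nat) = (right - left) / 2 := by simpa using Int.shiftRight_eq_div_pow (right - left) 1
    have hlo : 0 ≤ (right - left) / 2 := Int.ediv_nonneg (by omega) (by omega)
    omega

def get_num_same_as_index (nums : List Int) : Int :=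
  if nums = [] then -1
  else pvALoop nums 0 ((nums.length : Int) - 1)

-- ===== PORT B =====
-- diffs = [v - i for i, v in enumerate(nums)]
def pvDiffs (nums : List Int) : List Int :=
  (PySem.List.enumerate nums).map (fun p => p.2 - p.1)

-- B's recursive search for a zero of diffs on the bounds (lo, hi); fuel = list length + 1 is a
-- totality device only (the interval shrinks each call), never reached before lo > hi.
def pvSearch (diffs : List Int) : Nat → Int → Int → Int
  | 0, _, _ => -1
  | fuel + 1, lo, hi =>
    if lo > hi then -1
    else
      let mid := PySem.Int.floordiv (lo + hi) 2
      let d := PySem.List.pyGetD diffs mid 0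
      if d = 0 then mid
      else if d > 0 then pvSearch diffs fuel lo (mid - 1)
      else pvSearch diffs fuel (mid + 1) hi

def get_num_same_as_index_alt (nums : List Int) : Int :=
  pvSearch (pvDiffs nums) (nums.length + 1) 0 ((nums.length : Int) - 1)

-- ===== PRECONDITION & SPEC =====
def Spec_get_num_same_as_index (nums : List Int) (out : Int) : Prop := out = get_num_same_as_index_alt nums
instance (nums : List Int) (out : Int) : Decidable (Spec_get_num_same_as_index nums out) := by unfold Spec_get_num_same_as_index; infer_instance

-- ===== CLAIM =====
def Claim_equal_get_num_same_as_index : Prop := ∀ (nums : List Int), Dom_get_num_same_as_index nums → Spec_get_num_same_as_index nums (get_num_same_as_index nums)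

-- ===== LEMMAS AND PROOFS =====

theorem pvDiffs_length (nums : List Int) : (pvDiffs nums).length = nums.length := by
  simp [pvDiffs, PySem.List.length_enumerate]

theorem pvDiffs_getD (nums : List Int) (i : Int) (h0 : 0 ≤ i) (h1 : i < (nums.length : Int)) :
    PySem.List.pyGetD (pvDiffs nums) i 0 = PySem.List.pyGetD nums i 0 - i := by
  have hk : i.toNat < nums.length := by omega
  rw [PySem.List.pyGetD_eq_getElem (pvDiffs nums) 0 h0
        (by rw [pvDiffs_length]; exact h1),
      PySem.List.pyGetD_eq_getElem nums 0 h0 h1]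
  simp [pvDiffs, PySem.List.getElem_enumerate]
  omega

theorem pvALoop_eq_pvSearch (nums : List Int) : ∀ (fuel : Nat) (lo hi : Int),
    (hi + 1 - lo).toNat ≤ fuel → 0 ≤ lo → hi < (nums.length : Int) →
    pvALoop nums lo hi = pvSearch (pvDiffs nums) fuel lo hi := by
  intro fuel
  induction fuel with
  | zero =>
    intro lo hi h _ _
    rw [pvALoop, pvSearch]
    simp [show ¬ lo ≤ hi by omega]
  | succ n ih =>
    intro lo hi h hlo hhi
    rw [pvALoop, pvSearch]
    by_cases hle : lo ≤ hi
    · have hsh : (hi - lo) >>> (1:Nat) = (hi - lo) / 2 := by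
        simpa using Int.shiftRight_eq_div_pow (hi - lo) 1
      have hfd : PySem.Int.floordiv (lo + hi) 2 = (lo + hi) / 2 :=
        PySem.Int.floordiv_eq_ediv_of_pos (by omega)
      have hmid : lo + ((hi - lo) >>> (1:Nat)) = PySem.Int.floordiv (lo + hi) 2 := by
        rw [hsh, hfd]; omega
      have hmlo : lo ≤ PySem.Int.floordiv (lo + hi) 2 := by rw [hfd]; omega
      have hmhi : PySem.Int.floordiv (lo + hi) 2 ≤ hi := by rw [hfd]; omega
      have hd := pvDiffs_getD nums (PySem.Int.floordiv (lo + hi) 2) (by omega) (by omega)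
      simp only [hle, if_true, show ¬ lo > hi by omega, if_false, hmid, hd]
      have hc1 : (PySem.List.pyGetD nums (PySem.Int.floordiv (lo + hi) 2) 0
          - PySem.Int.floordiv (lo + hi) 2 = 0)
          ↔ (PySem.List.pyGetD nums (PySem.Int.floordiv (lo + hi) 2) 0
          = PySem.Int.floordiv (lo + hi) 2) := by omega
      have hc2 : (PySem.List.pyGetD nums (PySem.Int.floordiv (lo + hi) 2) 0
          - PySem.Int.floordiv (lo + hi) 2 > 0)
          ↔ (PySem.List.pyGetD nums (PySem.Int.floordiv (lo + hi) 2) 0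
          > PySem.Int.floordiv (lo + hi) 2) := by omega
      simp only [hc1, hc2]
      split_ifs with h1 h2
      · rfl
      · exact ih _ _ (by omega) hlo (by omega)
      · exact ih _ _ (by omega) (by omega) hhi
    · simp [hle, show lo > hi by omega]

-- ===== VERDICT =====
theorem get_num_same_as_index_spec : Claim_equal_get_num_same_as_index := by
  intro nums _
  unfold Spec_get_num_same_as_index get_num_same_as_index get_num_same_as_index_alt
  by_cases hnil : nums = []
  · subst hnil
    simp [pvSearch]
  · have hpos : 0 < nums.length := List.length_pos_iff.mpr hnil
    simp only [hnil, if_false]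
    exact pvALoop_eq_pvSearch nums _ 0 _ (by omega) (by omega) (by omega)
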